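-- pv_equiv track=rewrite | github.com/jplawdb4/jplawdb4 | insert_tables.py | grid_to_markdown
-- ===== SOURCE A (Python) =====
-- def grid_to_markdown(grid: list[list[str]]) -> str:
--     """行列リスト → Markdown テーブル文字列"""
--     if not grid:
--         return ""
--     # セル内の | と改行を置換（Markdown テーブル制約）
--     cleaned = [
--         [cell.replace("|", "｜").replace("\n", " ") for cell in row]
--         for row in grid
--     ]
--     num_cols = max(len(r) for r in cleaned)
--     col_w = [0] * num_cols
--     for row in cleaned:
--         for i, cell in enumerate(row):
--             if i < num_cols:
--                 col_w[i] = max(col_w[i], len(cell))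
--     col_w = [max(w, 3) for w in col_w]  # 最低幅 3
--
--     lines = []
--     for ri, row in enumerate(cleaned):
--         cells = []
--         for i in range(num_cols):
--             cell = row[i] if i < len(row) else ""
--             cells.append(cell.ljust(col_w[i]))
--         lines.append("| " + " | ".join(cells) + " |")
--         if ri == 0:
--             lines.append("| " + " | ".join("-" * w for w in col_w) + " |")
--     return "\n" + "\n".join(lines) + "\n"
-- ===== SOURCE B (Python) =====
-- def _clean(cell: str) -> str:
--     return cell.replace("|", "\uff5c").replace("\n", " ")
--
--
-- def grid_to_markdown(grid: list[list[str]]) -> str: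
--     """行列リスト → Markdown テーブル文字列 (column-major construction)"""
--     if not grid:
--         return ""
--     num_cols = max(len(row) for row in grid)
--     # build the table one COLUMN at a time: each column already carries its
--     # separator cell at position 1, then transpose by row index
--     columns = []
--     for i in range(num_cols):
--         cells = [_clean(row[i]) if i < len(row) else "" for row in grid]
--         w = max(3, max(len(c) for c in cells))
--         columns.append([cells[0].ljust(w), "-" * w] + [c.ljust(w) for c in cells[1:]])
--     lines = ["| " + " | ".join(col[j] for col in columns) + " |"
--              for j in range(len(grid) + 1)]
--     return "\n" + "\n".join(lines) + "\n"
-- ===== Notes on version B (the rewrite author's own statement) =====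
-- stated objective: alternative
-- what changed: B builds the table column-major: for each column it extracts the column's cells, computes that column's width locally, and emits the fully padded column (with its separator cell already at position 1); the output lines are then produced by transposing the list of finished columns by row index, instead of A's row-major loop over rows with a mutable global width array and an enumerate-driven separator insertion.
import Mathlib
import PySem

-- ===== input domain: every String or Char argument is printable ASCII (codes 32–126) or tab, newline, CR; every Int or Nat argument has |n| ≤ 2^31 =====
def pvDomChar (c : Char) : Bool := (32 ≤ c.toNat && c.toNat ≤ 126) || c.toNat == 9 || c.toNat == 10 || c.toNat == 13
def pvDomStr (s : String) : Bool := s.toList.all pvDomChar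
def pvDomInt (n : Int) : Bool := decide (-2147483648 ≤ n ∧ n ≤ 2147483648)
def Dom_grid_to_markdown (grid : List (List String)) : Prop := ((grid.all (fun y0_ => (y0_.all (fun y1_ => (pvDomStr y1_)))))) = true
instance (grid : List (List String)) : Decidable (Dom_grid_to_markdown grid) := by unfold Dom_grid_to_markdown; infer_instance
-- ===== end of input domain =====

-- B constructs the table column-major (each finished column carries its own width and
-- separator cell, lines arise by transposition) instead of A's row-major loop with a
-- mutable global width array (objective: alternative).

-- shared helpers (both Pythons contain literally these expressions)
-- len(s) as a Nat (= PySem.Str.len s, which is the Int cast of this)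
def pvLen (s : String) : Nat := s.toList.length
-- cell.replace("|", "｜").replace("\n", " ")
def pvClean (cell : String) : String :=
  PySem.Str.replace (PySem.Str.replace cell "|" "｜") "\n" " "
-- s.ljust(w): pad on the right with spaces to width w (exact: no-op when len s ≥ w)
def pvLjust (s : String) (w : Nat) : String :=
  s ++ String.ofList (List.replicate (w - pvLen s) ' ')
-- "-" * w
def pvDashes (w : Nat) : String := String.ofList (List.replicate w '-')

-- ===== PORT A =====
-- inner loop: for i, cell in enumerate(row): if i < num_cols: col_w[i] = max(col_w[i], len(cell))
def gtmA_upd (n : Nat) (i : Nat) (w : List Nat) : List String → List Nat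
  | [] => w
  | c :: rest =>
      gtmA_upd n (i + 1)
        (if i < n then w.set i (max (w.getD i 0) (pvLen c)) else w) rest

-- one body line: "| " + " | ".join(cells) + " |" with cells from range(num_cols)
def gtmA_line (n : Nat) (colw : List Nat) (row : List String) : String :=
  "| " ++ PySem.Str.join " | "
    ((List.range n).map (fun i =>
      pvLjust (if i < row.length then row.getD i "" else "") (colw.getD i 0))) ++ " |"

def gtmA_sep (colw : List Nat) : String :=
  "| " ++ PySem.Str.join " | " (colw.map pvDashes) ++ " |"

-- for ri, row in enumerate(cleaned): append line; if ri == 0: append separator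
def gtmA_lines (n : Nat) (colw : List Nat) (ri : Nat) : List (List String) → List String
  | [] => []
  | row :: rest =>
      gtmA_line n colw row :: ((if ri = 0 then [gtmA_sep colw] else []) ++ gtmA_lines n colw (ri + 1) rest)

def grid_to_markdown (grid : List (List String)) : String :=
  if grid = [] then ""
  else
    let cleaned := grid.map (fun row => row.map pvClean)
    -- max(len(r) for r in cleaned): the generator is nonempty, so the .getD 0 never fires
    let num_cols := ((PySem.List.max? (cleaned.map List.length) id).getD 0)
    let col_w0 := cleaned.foldl (fun w row => gtmA_upd num_cols 0 w row) (List.replicate num_cols 0)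
    let col_w := col_w0.map (fun w => max w 3)
    let lines := gtmA_lines num_cols col_w 0 cleaned
    "\n" ++ PySem.Str.join "\n" lines ++ "\n"

-- ===== PORT B =====
-- [_clean(row[i]) if i < len(row) else "" for row in grid]  (column i's cells)
def gtmB_cells (grid : List (List String)) (i : Nat) : List String :=
  grid.map (fun row => if i < row.length then pvClean (row.getD i "") else "")

-- one finished column: [cells[0].ljust(w), "-" * w] + [c.ljust(w) for c in cells[1:]]
def gtmB_col (grid : List (List String)) (i : Nat) : List String :=
  let cells := gtmB_cells grid i
  -- max(len(c) for c in cells): nonempty (grid nonempty), so the .getD 0 never fires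
  let w := max 3 ((PySem.List.max? (cells.map pvLen) (fun y => y)).getD 0)
  pvLjust (cells.getD 0 "") w :: pvDashes w :: (cells.drop 1).map (fun c => pvLjust c w)

def grid_to_markdown_alt (grid : List (List String)) : String :=
  if grid = [] then ""
  else
    -- max(len(row) for row in grid): nonempty, so the .getD 0 never fires
    let num_cols := ((PySem.List.max? (grid.map List.length) id).getD 0)
    let columns := (List.range num_cols).map (gtmB_col grid)
    -- transpose: line j reads entry j of every column (col[j] is always in range)
    let lines := (List.range (grid.length + 1)).map (fun j =>
      "| " ++ PySem.Str.join " | " (columns.map (fun col => col.getD j "")) ++ " |")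
    "\n" ++ PySem.Str.join "\n" lines ++ "\n"

-- ===== PRECONDITION & SPEC =====
def Spec_grid_to_markdown (grid : List (List String)) (out : String) : Prop := out = grid_to_markdown_alt grid
instance (grid : List (List String)) (out : String) : Decidable (Spec_grid_to_markdown grid out) := by unfold Spec_grid_to_markdown; infer_instance

-- ===== CLAIM =====
def Claim_equal_grid_to_markdown : Prop := ∀ (grid : List (List String)), Dom_grid_to_markdown grid → Spec_grid_to_markdown grid (grid_to_markdown grid)

-- ===== LEMMAS AND PROOFS =====

-- the cleaned cell A reads at column i of a row, as a single expression
def pvCell (row : List String) (i : Nat) : String := (row.map pvClean).getD i ""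

theorem pvCell_eq_ite (row : List String) (i : Nat) :
    (if i < row.length then pvClean (row.getD i "") else "") = pvCell row i := by
  unfold pvCell
  by_cases h : i < row.length
  · rw [if_pos h, List.getD, List.getD, List.getElem?_map,
      List.getElem?_eq_getElem h]
    rfl
  · rw [if_neg h, List.getD_eq_default _ _ (by simpa using h)]

theorem gtmB_cells_eq (grid : List (List String)) (i : Nat) :
    gtmB_cells grid i = grid.map (fun row => pvCell row i) := by
  unfold gtmB_cells
  exact List.map_congr_left (fun row _ => pvCell_eq_ite row i)

theorem gtmA_upd_length (n : Nat) (r : List String) (i : Nat) (w : List Nat) :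
    (gtmA_upd n i w r).length = w.length := by
  induction r generalizing i w with
  | nil => rfl
  | cons c rest ih =>
      simp only [gtmA_upd]
      rw [ih]
      split <;> simp

theorem gtmA_upd_getD (n : Nat) (r : List String) (i : Nat) (w : List Nat)
    (hw : w.length = n) (j : Nat) :
    (gtmA_upd n i w r).getD j 0 =
      if i ≤ j ∧ j < i + r.length ∧ j < n then
        max (w.getD j 0) (pvLen (r.getD (j - i) ""))
      else w.getD j 0 := by
  induction r generalizing i w with
  | nil => simp [gtmA_upd]; intro h1 h2; omega
  | cons c rest ih =>
      simp only [gtmA_upd]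
      rw [ih _ _ (by split <;> simp [hw])]
      by_cases hji : j = i
      · subst hji
        by_cases hn : j < n
        · simp [hn, List.getD, List.getElem?_set_self (by omega : j < w.length)]
          try omega
        · simp [hn]
          try omega
      · have hset : (if i < n then w.set i (max (w.getD i 0) (pvLen c)) else w).getD j 0
            = w.getD j 0 := by
          split
          · simp [List.getD, List.getElem?_set_ne (by omega : i ≠ j)]
          · rfl
        rw [hset]
        by_cases h1 : i + 1 ≤ j ∧ j < i + 1 + rest.length ∧ j < n
        · have : i ≤ j ∧ j < i + (c :: rest).length ∧ j < n := by
            simp; omega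
          simp only [if_pos h1, if_pos this]
          have : (c :: rest).getD (j - i) "" = rest.getD (j - (i + 1)) "" := by
            have hji' : j - i = (j - (i + 1)) + 1 := by omega
            rw [hji']; rfl
          rw [this]
        · have : ¬ (i ≤ j ∧ j < i + (c :: rest).length ∧ j < n) := by
            simp only [List.length_cons]; omega
          simp only [if_neg h1, if_neg this]

-- the accumulated width array, read per column, is the column-wise running max
theorem gtmA_fold_getD (n : Nat) (rows : List (List String)) (w : List Nat)
    (hw : w.length = n) (j : Nat) (hj : j < n) :
    (rows.foldl (fun w row => gtmA_upd n 0 w row) w).getD j 0 =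
      rows.foldl (fun m row => max m (pvLen (row.getD j ""))) (w.getD j 0) := by
  induction rows generalizing w with
  | nil => rfl
  | cons r rest ih =>
      simp only [List.foldl_cons]
      rw [ih _ (by rw [gtmA_upd_length, hw])]
      rw [gtmA_upd_getD n r 0 w hw j]
      by_cases hr : j < r.length
      · simp [hj, hr]
      · have h0 : r.getD j "" = "" := List.getD_eq_default _ _ (by omega)
        have h1 : pvLen "" = 0 := rfl
        simp [hr, h1]

theorem gtmA_fold_length (n : Nat) (rows : List (List String)) (w : List Nat) :
    (rows.foldl (fun w row => gtmA_upd n 0 w row) w).length = w.length := by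
  induction rows generalizing w with
  | nil => rfl
  | cons r rest ih => simp only [List.foldl_cons]; rw [ih, gtmA_upd_length]

-- B's local column width equals A's accumulated width (before the clamp), clamped
theorem widthB_eq (g0 : List String) (gs : List (List String)) (i : Nat) :
    max 3 ((PySem.List.max? ((gtmB_cells (g0 :: gs) i).map pvLen) (fun y => y)).getD 0) =
      max (((g0 :: gs).map (fun row => row.map pvClean)).foldl
            (fun m row => max m (pvLen (row.getD i ""))) 0) 3 := by
  rw [gtmB_cells_eq]
  simp only [List.map_cons, List.map_map]
  rw [PySem.List.max?_id_cons]
  simp only [Option.getD_some]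
  rw [List.foldl_map, List.foldl_cons, List.foldl_map]
  rw [Nat.max_comm 3, Nat.zero_max]
  rfl

-- (range l.length).map (f ∘ getD) is l.map f
theorem map_range_getD {α β : Type} [Inhabited α] (l : List α) (f : α → β) :
    (List.range l.length).map (fun k => f (l.getD k default)) = l.map f := by
  apply List.ext_getElem
  · simp
  · intro k h1 h2
    have hk : k < l.length := by simpa using h2
    simp [List.getD, List.getElem?_eq_getElem hk]

-- A's line on a cleaned row, written with getD-cells
theorem gtmA_line_eq (n : Nat) (colw : List Nat) (row : List String) :
    gtmA_line n colw (row.map pvClean) =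
      "| " ++ PySem.Str.join " | "
        ((List.range n).map (fun i => pvLjust (pvCell row i) (colw.getD i 0))) ++ " |" := by
  unfold gtmA_line
  have h : (List.range n).map (fun i =>
        pvLjust (if i < (row.map pvClean).length then (row.map pvClean).getD i "" else "")
          (colw.getD i 0))
      = (List.range n).map (fun i => pvLjust (pvCell row i) (colw.getD i 0)) := by
    apply List.map_congr_left
    intro i _
    congr 1
    unfold pvCell
    by_cases hlt : i < (row.map pvClean).length
    · rw [if_pos hlt]
    · rw [if_neg hlt, List.getD_eq_default _ _ (by simpa using hlt)]
  rw [h]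

-- the enumerated loop, past the first row, is a plain map
theorem gtmA_lines_of_pos (n : Nat) (colw : List Nat) (ri : Nat) (hri : ri ≠ 0)
    (rows : List (List String)) :
    gtmA_lines n colw ri rows = rows.map (gtmA_line n colw) := by
  induction rows generalizing ri with
  | nil => rfl
  | cons r rest ih => simp [gtmA_lines, hri, ih (ri + 1) (by omega)]

-- reading entry j of every finished column, for the three shapes of j
theorem gtmB_col_getD_zero (g0 : List String) (gs : List (List String)) (i : Nat) :
    (gtmB_col (g0 :: gs) i).getD 0 "" =
      pvLjust (pvCell g0 i)
        (max 3 ((PySem.List.max? ((gtmB_cells (g0 :: gs) i).map pvLen) (fun y => y)).getD 0)) := by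
  simp only [gtmB_col, List.getD_cons_zero]
  congr 1
  rw [gtmB_cells_eq]
  rfl

theorem gtmB_col_getD_one (g0 : List String) (gs : List (List String)) (i : Nat) :
    (gtmB_col (g0 :: gs) i).getD 1 "" =
      pvDashes (max 3 ((PySem.List.max? ((gtmB_cells (g0 :: gs) i).map pvLen) (fun y => y)).getD 0)) := by
  simp [gtmB_col]

theorem gtmB_col_getD_succ (g0 : List String) (gs : List (List String)) (i k : Nat)
    (hk : k < gs.length) :
    (gtmB_col (g0 :: gs) i).getD (k + 2) "" =
      pvLjust (pvCell (gs.getD k []) i)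
        (max 3 ((PySem.List.max? ((gtmB_cells (g0 :: gs) i).map pvLen) (fun y => y)).getD 0)) := by
  simp only [gtmB_col, List.getD_cons_succ]
  rw [gtmB_cells_eq]
  simp only [List.map_cons, List.drop_succ_cons, List.drop_zero, List.map_map]
  rw [List.getD, List.getElem?_map, List.getElem?_eq_getElem (by simpa using hk)]
  simp [Function.comp, List.getD, List.getElem?_eq_getElem hk]

-- ===== VERDICT =====
theorem grid_to_markdown_spec : Claim_equal_grid_to_markdown := by
  intro grid _
  unfold Spec_grid_to_markdown grid_to_markdown grid_to_markdown_alt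
  cases grid with
  | nil => rfl
  | cons g0 gs =>
      simp only [reduceCtorEq, if_false]
      set cleaned := (g0 :: gs).map (fun row => row.map pvClean) with hcl
      have hlens : cleaned.map List.length = ((g0 :: gs) : List (List String)).map List.length := by
        simp [hcl, Function.comp]
      set n := ((PySem.List.max? (((g0 :: gs) : List (List String)).map List.length) id).getD 0) with hn
      have hnA : ((PySem.List.max? (cleaned.map List.length) id).getD 0) = n := by
        rw [hlens]
      rw [hnA]
      set col_w0 := cleaned.foldl (fun w row => gtmA_upd n 0 w row) (List.replicate n 0) with hcw0
      set colw := col_w0.map (fun w => max w 3) with hcw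
      have hcw0len : col_w0.length = n := by
        rw [hcw0, gtmA_fold_length]; simp
      have hcwlen : colw.length = n := by simp [hcw, hcw0len]
      -- per-column width agreement
      have hwid : ∀ i, i < n →
          max 3 ((PySem.List.max? ((gtmB_cells (g0 :: gs) i).map pvLen) (fun y => y)).getD 0)
            = colw.getD i 0 := by
        intro i hi
        have hgd : colw.getD i 0 = max (col_w0.getD i 0) 3 := by
          rw [hcw, List.getD, List.getElem?_map,
            List.getElem?_eq_getElem (by rw [hcw0len]; exact hi)]
          simp [List.getD, hcw0len, hi]
        have hrep : (List.replicate n (0 : Nat)).getD i 0 = 0 := by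
          simp [List.getD]
        rw [widthB_eq g0 gs i, ← hcl, hgd, hcw0,
          gtmA_fold_getD n cleaned _ (by simp) i hi, hrep]
      -- the two line lists coincide
      have hlines : gtmA_lines n colw 0 cleaned
          = (List.range ((g0 :: gs).length + 1)).map (fun j =>
              "| " ++ PySem.Str.join " | "
                (((List.range n).map (gtmB_col (g0 :: gs))).map (fun col => col.getD j "")) ++ " |") := by
        have hAexp : gtmA_lines n colw 0 cleaned
            = gtmA_line n colw (g0.map pvClean) :: gtmA_sep colw
                :: (gs.map (fun r => r.map pvClean)).map (gtmA_line n colw) := by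
          rw [hcl]
          simp only [List.map_cons]
          rw [gtmA_lines, gtmA_lines_of_pos n colw 1 (by omega)]
          simp
        rw [hAexp]
        apply List.ext_getElem
        · simp
        · intro j h1 h2
          simp only [List.getElem_map, List.getElem_range, List.map_map]
          rcases j with _ | _ | k
          · -- header row
            simp only [List.getElem_cons_zero]
            rw [gtmA_line_eq]
            have h : (List.range n).map (fun i => pvLjust (pvCell g0 i) (colw.getD i 0))
                = (List.range n).map
                    ((fun col => col.getD 0 "") ∘ gtmB_col (g0 :: gs)) := by
              apply List.map_congr_left
              intro i hi
              simp only [Function.comp_apply]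
              rw [gtmB_col_getD_zero, hwid i (List.mem_range.mp hi)]
            rw [h]
          · -- separator row
            simp only [List.getElem_cons_succ, List.getElem_cons_zero]
            unfold gtmA_sep
            have hsep : colw.map pvDashes
                = (List.range n).map ((fun col => col.getD 1 "") ∘ gtmB_col (g0 :: gs)) := by
              conv_lhs => rw [← map_range_getD colw pvDashes]
              rw [hcwlen]
              apply List.map_congr_left
              intro i hi
              simp only [Function.comp_apply]
              rw [gtmB_col_getD_one, hwid i (List.mem_range.mp hi)]
              rfl
            rw [hsep]
          · -- body rows
            have hk : k < gs.length := by
              simp only [List.length_cons, List.length_map] at h1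
              omega
            simp only [List.getElem_cons_succ, List.getElem_map, Function.comp_apply]
            have hget : gs[k]'hk = gs.getD k [] := by
              simp [List.getD, List.getElem?_eq_getElem hk]
            rw [hget, gtmA_line_eq]
            have h : (List.range n).map
                  (fun i => pvLjust (pvCell (gs.getD k []) i) (colw.getD i 0))
                = (List.range n).map
                    ((fun col => col.getD (k + 1 + 1) "") ∘ gtmB_col (g0 :: gs)) := by
              apply List.map_congr_left
              intro i hi
              simp only [Function.comp_apply]
              rw [show k + 1 + 1 = k + 2 from rfl,
                gtmB_col_getD_succ g0 gs i k hk, hwid i (List.mem_range.mp hi)]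
            rw [h]
      rw [hlines]
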